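-- pv_equiv track=rewrite | github.com/Peanut-XIV/find_duplicates | main.py | table_counts
-- ===== SOURCE A (Python) =====
-- def table_counts(crops_table: list[list[list]]) -> (list[list[int]], int):
--     counts = []
--     empty_count = 0
--     for row in crops_table:
--         row_counts = []
--         for cell in row:
--             count = len(cell)
--             if count == 0:
--                 empty_count += 1
--             row_counts.append(count)
--         counts.append(row_counts)
--     return counts, empty_count
-- ===== SOURCE B (Python) =====
-- def table_counts(crops_table: list[list[list]]) -> (list[list[int]], int):
--     # Structural recursion: combine on return, no mutable accumulators.
--     def row_counts(row):
--         if not row: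
--             return [], 0
--         c = len(row[0])
--         tail, e = row_counts(row[1:])
--         return [c] + tail, e + (1 if c == 0 else 0)
--
--     if not crops_table:
--         return [], 0
--     first, fe = row_counts(crops_table[0])
--     rest, re_ = table_counts(crops_table[1:])
--     return [first] + rest, fe + re_
-- ===== Notes on version B (the rewrite author's own statement) =====
-- stated objective: alternative
-- what changed: Replaces A's iterative fused loop with mutable list/counter accumulators by pure structural recursion on rows and cells, building results on the way back out of the recursion and summing empties by combination.
import Mathlib
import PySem

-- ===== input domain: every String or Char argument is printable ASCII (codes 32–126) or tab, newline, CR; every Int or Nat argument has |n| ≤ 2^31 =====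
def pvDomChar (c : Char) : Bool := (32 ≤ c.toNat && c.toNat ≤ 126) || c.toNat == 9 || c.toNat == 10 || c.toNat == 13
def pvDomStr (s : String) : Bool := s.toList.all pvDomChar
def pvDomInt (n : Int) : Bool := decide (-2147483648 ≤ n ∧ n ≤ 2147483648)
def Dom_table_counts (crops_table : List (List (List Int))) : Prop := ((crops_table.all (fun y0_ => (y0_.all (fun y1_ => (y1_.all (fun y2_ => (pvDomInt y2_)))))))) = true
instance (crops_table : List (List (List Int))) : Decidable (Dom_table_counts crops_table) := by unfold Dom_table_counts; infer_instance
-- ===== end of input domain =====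

-- B replaces A's iterative fused loop with mutable accumulators by pure structural
-- recursion over rows and cells, combining results on return. Objective: alternative.

-- ===== PORT A =====
-- A: one fused loop, accumulators `counts` and `empty_count`, inner loop appends and bumps empty_count.
def table_counts (crops_table : List (List (List Int))) : List (List Int) × Int :=
  let st := crops_table.foldl
    (fun (st : List (List Int) × Int) row =>
      let inner := row.foldl
        (fun (st2 : List Int × Int) cell =>
          let count : Int := cell.length
          let empty := if count == 0 then st2.2 + 1 else st2.2
          (st2.1 ++ [count], empty))
        ([], st.2)
      (st.1 ++ [inner.1], inner.2))
    ([], 0)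
  (st.1, st.2)

-- ===== PORT B =====
-- B's helper: recursion over the cells of one row, combining on return.
def pvRowCounts : List (List Int) → List Int × Int
  | [] => ([], 0)
  | cell :: rest =>
    let c : Int := cell.length
    let (tl, e) := pvRowCounts rest
    (c :: tl, e + (if c == 0 then 1 else 0))

-- B: recursion over the rows, combining on return.
def table_counts_alt : List (List (List Int)) → List (List Int) × Int
  | [] => ([], 0)
  | row :: rest =>
    let (first, fe) := pvRowCounts row
    let (tail, re) := table_counts_alt rest
    (first :: tail, fe + re)

-- ===== PRECONDITION & SPEC =====
def Spec_table_counts (crops_table : List (List (List Int))) (out : List (List Int) × Int) : Prop := out = table_counts_alt crops_table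
instance (crops_table : List (List (List Int))) (out : List (List Int) × Int) : Decidable (Spec_table_counts crops_table out) := by unfold Spec_table_counts; infer_instance

-- ===== CLAIM (what is proved, stated in full; the proofs are below) =====
def Claim_equal_table_counts : Prop := ∀ (crops_table : List (List (List Int))), Dom_table_counts crops_table → Spec_table_counts crops_table (table_counts crops_table)

-- ===== LEMMAS AND PROOFS =====

-- A's inner loop, started at (acc, e), appends B's row result and adds its empty count.
theorem pv_inner (row : List (List Int)) (acc : List Int) (e : Int) :
    row.foldl
      (fun (st2 : List Int × Int) cell =>
        let count : Int := cell.length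
        let empty := if count == 0 then st2.2 + 1 else st2.2
        (st2.1 ++ [count], empty))
      (acc, e)
    = (acc ++ (pvRowCounts row).1, e + (pvRowCounts row).2) := by
  induction row generalizing acc e with
  | nil => simp [pvRowCounts]
  | cons c t ih =>
    simp only [List.foldl_cons, pvRowCounts, ih]
    by_cases h : c = []
    · simp [h]; ring
    · simp [h]

-- The outer fold after the inner loop is summarised by pvRowCounts.
theorem pv_outer2 (t : List (List (List Int))) (acc : List (List Int)) (e : Int) :
    t.foldl (fun (st : List (List Int) × Int) row =>
        (st.1 ++ [(pvRowCounts row).1], st.2 + (pvRowCounts row).2)) (acc, e)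
    = (acc ++ (table_counts_alt t).1, e + (table_counts_alt t).2) := by
  induction t generalizing acc e with
  | nil => simp [table_counts_alt]
  | cons r tl ih =>
    simp only [List.foldl_cons]
    rw [ih]
    simp [table_counts_alt]
    ring

-- A's outer loop, started at (acc, e), appends B's result and adds its empty count.
theorem pv_outer (t : List (List (List Int))) (acc : List (List Int)) (e : Int) :
    t.foldl
      (fun (st : List (List Int) × Int) row =>
        let inner := row.foldl
          (fun (st2 : List Int × Int) cell =>
            let count : Int := cell.length
            let empty := if count == 0 then st2.2 + 1 else st2.2
            (st2.1 ++ [count], empty))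
          ([], st.2)
        (st.1 ++ [inner.1], inner.2))
      (acc, e)
    = (acc ++ (table_counts_alt t).1, e + (table_counts_alt t).2) := by
  simp only [pv_inner, List.nil_append]
  exact pv_outer2 t acc e

-- ===== VERDICT (by name: the statement is the Claim_ definition above) =====
theorem table_counts_spec : Claim_equal_table_counts := by
  intro t _
  show table_counts t = table_counts_alt t
  unfold table_counts
  rw [pv_outer]
  simp
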